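-- pv_equiv track=rewrite | github.com/sinkect/PEC-1 | models/data.py | _find_all_substring_spans
-- ===== SOURCE A (Python) =====
-- from typing import Any, Callable, Dict, List, Optional, Sequence, Tuple
--
-- def _find_all_substring_spans(text: str, substring: str) -> List[Tuple[int, int]]:
--     if not text or not substring:
--         return []
--
--     spans: List[Tuple[int, int]] = []
--     search_start = 0
--     while True:
--         match_index = text.find(substring, search_start)
--         if match_index < 0:
--             break
--         spans.append((match_index, match_index + len(substring)))
--         search_start = match_index + len(substring)
--     return spans
-- ===== SOURCE B (Python) =====
-- from typing import List, Tuple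
--
-- def _find_all_substring_spans(text: str, substring: str) -> List[Tuple[int, int]]:
--     if not text or not substring:
--         return []
--     m = len(substring)
--     spans: List[Tuple[int, int]] = []
--     pos = 0
--     for part in text.split(substring)[:-1]:
--         pos += len(part)
--         spans.append((pos, pos + m))
--         pos += m
--     return spans
-- ===== Notes on version B (the rewrite author's own statement) =====
-- stated objective: alternative
-- what changed: Replaces A's repeated text.find(..., search_start) loop with text.split(substring): the text is cut at the non-overlapping occurrences and the spans are reconstructed from the cumulative lengths of the pieces between them.
import Mathlib
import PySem

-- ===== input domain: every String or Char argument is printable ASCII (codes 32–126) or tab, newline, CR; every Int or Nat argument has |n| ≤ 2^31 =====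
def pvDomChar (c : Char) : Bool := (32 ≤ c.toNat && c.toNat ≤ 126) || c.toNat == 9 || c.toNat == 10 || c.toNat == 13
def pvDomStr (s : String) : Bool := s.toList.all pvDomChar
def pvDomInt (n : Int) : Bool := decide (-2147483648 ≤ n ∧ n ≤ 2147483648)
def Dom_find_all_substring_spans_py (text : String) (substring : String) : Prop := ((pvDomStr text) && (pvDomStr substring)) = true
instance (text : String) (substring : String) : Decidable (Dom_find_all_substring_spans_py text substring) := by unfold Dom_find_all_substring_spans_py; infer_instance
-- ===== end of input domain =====

-- B replaces A's find-and-restart loop: it cuts the text with str.split(substring) and reconstructs the spans from the piece lengths in one pass; same cost class, no speed claim.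


-- ===== PORT A =====
-- while True: match_index = text.find(substring, search_start); if < 0 break; append; advance.
-- Ported with fuel text.length+1, enough because each iteration advances search_start by len(substring) ≥ 1.
def pvFindLoopA (text substring : String) (searchStart : Int) (spans : List (Int × Int)) : Nat → List (Int × Int)
  | 0 => spans
  | Nat.succ fuel =>
    let matchIndex := PySem.Str.findFrom text substring searchStart
    if matchIndex < 0 then spans
    else pvFindLoopA text substring (matchIndex + PySem.Str.len substring)
           (spans ++ [(matchIndex, matchIndex + PySem.Str.len substring)]) fuel

def find_all_substring_spans_py (text : String) (substring : String) : List (Int × Int) :=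
  if text.toList.isEmpty || substring.toList.isEmpty then []
  else pvFindLoopA text substring 0 [] (text.toList.length + 1)

-- ===== PORT B =====
-- the loop body of Source B: pos += len(part); spans.append((pos, pos+m)); pos += m
def pvStepB (m : Int) (st : Int × List (Int × Int)) (part : List Char) : Int × List (Int × Int) :=
  let pos := st.1 + (part.length : Int)
  (pos + m, st.2 ++ [(pos, pos + m)])

-- guard; then for part in text.split(substring)[:-1]: pvStepB.  split = PySem.Chars.splitOn (sep ≠ '' by the guard); [:-1] = dropLast.
def find_all_substring_spans_py_alt (text : String) (substring : String) : List (Int × Int) :=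
  if text.toList.isEmpty || substring.toList.isEmpty then []
  else
    ((PySem.Chars.splitOn text.toList substring.toList).dropLast.foldl
      (pvStepB (PySem.Str.len substring)) ((0 : Int), ([] : List (Int × Int)))).2

-- ===== PRECONDITION & SPEC =====
def Spec_find_all_substring_spans_py (text : String) (substring : String) (out : List (Int × Int)) : Prop := out = find_all_substring_spans_py_alt text substring
instance (text : String) (substring : String) (out : List (Int × Int)) : Decidable (Spec_find_all_substring_spans_py text substring out) := by unfold Spec_find_all_substring_spans_py; infer_instance

-- ===== CLAIM (what is proved, stated in full; the proofs are below) =====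
def Claim_equal_find_all_substring_spans_py : Prop := ∀ (text : String) (substring : String), Dom_find_all_substring_spans_py text substring → Spec_find_all_substring_spans_py text substring (find_all_substring_spans_py text substring)

-- ===== LEMMAS AND PROOFS =====

-- proof-side: the pure parts of splitOn, one find-step at a time (fuel ≥ length suffices)
def pvParts (sub : List Char) : Nat → List Char → List (List Char)
  | 0, l => [l]
  | Nat.succ fuel, l =>
    if PySem.Chars.find l sub = -1 then [l]
    else l.take (PySem.Chars.find l sub).toNat ::
         pvParts sub fuel (l.drop ((PySem.Chars.find l sub).toNat + sub.length))

def pvConsHead (x : List Char) : List (List Char) → List (List Char)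
  | [] => [x]
  | h :: t => (x ++ h) :: t

-- proof-side: the spans B's fold produces on the parts of l, with positions shifted by i
def pvSpansOf (sub l : List Char) (i : Int) : List (Int × Int) :=
  ((pvParts sub l.length l).dropLast.foldl (pvStepB (sub.length : Int)) (i, [])).2

lemma pv_go_nil (sep cur : List Char) (acc : List (List Char)) (fuel : Nat) :
    PySem.Chars.splitOn.go sep (fuel+1) [] cur acc = (cur.reverse :: acc).reverse := by
  rw [PySem.Chars.splitOn.go]; omega

lemma pv_go_cons (sep cur : List Char) (c : Char) (rest : List Char) (acc : List (List Char)) (fuel : Nat) :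
    PySem.Chars.splitOn.go sep (fuel+1) (c :: rest) cur acc =
      if sep.isPrefixOf (c :: rest) then
        PySem.Chars.splitOn.go sep fuel ((c :: rest).drop sep.length) [] (cur.reverse :: acc)
      else PySem.Chars.splitOn.go sep fuel rest (c :: cur) acc := by
  rw [PySem.Chars.splitOn.go]

lemma pv_find_nonneg (l sub : List Char) (h : PySem.Chars.find l sub ≠ -1) :
    0 ≤ PySem.Chars.find l sub := by
  have := PySem.Chars.neg_one_le_find l sub; omega

lemma pv_find_nil (sub : List Char) (hsub : sub ≠ []) :
    PySem.Chars.find [] sub = -1 := by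
  rw [PySem.Chars.find_eq_neg_one_iff]
  intro h
  exact hsub (List.eq_nil_of_infix_nil h)

lemma pv_find_prefix (l sub : List Char) (h : sub <+: l) :
    PySem.Chars.find l sub = 0 := by
  have h0 : 0 ≤ PySem.Chars.find l sub := by
    rw [PySem.Chars.find_nonneg_iff]; exact h.isInfix
  obtain ⟨hp, hmin⟩ := PySem.Chars.find_spec h0
  by_contra hne
  have hpos : 0 < (PySem.Chars.find l sub).toNat := by omega
  exact hmin 0 hpos (by simpa using h)

lemma pv_find_cons (c : Char) (rest sub : List Char)
    (hnp : ¬ sub <+: (c :: rest)) :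
    PySem.Chars.find (c :: rest) sub =
      if PySem.Chars.find rest sub = -1 then -1 else PySem.Chars.find rest sub + 1 := by
  by_cases hr : PySem.Chars.find rest sub = -1
  · rw [if_pos hr]
    rw [PySem.Chars.find_eq_neg_one_iff] at hr ⊢
    intro hin
    have : ∃ j, sub <+: (c :: rest).drop j := by
      rw [PySem.Chars.exists_prefix_drop_iff_isIn, PySem.Chars.isIn_iff_infix]; exact hin
    obtain ⟨j, hj⟩ := this
    cases j with
    | zero => exact hnp (by simpa using hj)
    | succ j' =>
      exact hr (by
        rw [← PySem.Chars.isIn_iff_infix, ← PySem.Chars.exists_prefix_drop_iff_isIn]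
        exact ⟨j', by simpa using hj⟩)
  · rw [if_neg hr]
    have hg : 0 ≤ PySem.Chars.find rest sub := pv_find_nonneg _ _ hr
    obtain ⟨hgp, hgmin⟩ := PySem.Chars.find_spec hg
    set g := PySem.Chars.find rest sub with hgdef
    have hfin : 0 ≤ PySem.Chars.find (c :: rest) sub := by
      rw [PySem.Chars.find_nonneg_iff, ← PySem.Chars.isIn_iff_infix,
        ← PySem.Chars.exists_prefix_drop_iff_isIn]
      exact ⟨g.toNat + 1, by simpa using hgp⟩
    obtain ⟨hfp, hfmin⟩ := PySem.Chars.find_spec hfin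
    set f := PySem.Chars.find (c :: rest) sub with hfdef
    have hf0 : f.toNat ≠ 0 := by
      intro h0
      exact hnp (by simpa [h0] using hfp)
    have h1 : g.toNat ≤ f.toNat - 1 := by
      by_contra hlt
      have : f.toNat - 1 < g.toNat := by omega
      exact hgmin _ this (by
        have : sub <+: List.drop (f.toNat - 1 + 1) (c :: rest) := by
          rw [show f.toNat - 1 + 1 = f.toNat by omega]; exact hfp
        simpa using this)
    have h2 : f.toNat ≤ g.toNat + 1 := by
      by_contra hlt
      exact hfmin (g.toNat + 1) (by omega) (by simpa using hgp)
    omega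

lemma pvParts_ne_nil (sub : List Char) (fuel : Nat) (l : List Char) :
    pvParts sub fuel l ≠ [] := by
  cases fuel with
  | zero => simp [pvParts]
  | succ k =>
    rw [pvParts]
    split <;> simp

lemma pvParts_nil (sub : List Char) (hsub : sub ≠ []) (fuel : Nat) :
    pvParts sub fuel [] = [[]] := by
  cases fuel with
  | zero => rfl
  | succ k => rw [pvParts, if_pos (pv_find_nil sub hsub)]

lemma pvParts_fuel (sub : List Char) (hsub : sub ≠ []) :
    ∀ (fuel1 : Nat), ∀ (l : List Char) (fuel2 : Nat),
      l.length ≤ fuel1 → l.length ≤ fuel2 →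
      pvParts sub fuel1 l = pvParts sub fuel2 l := by
  intro fuel1
  induction fuel1 with
  | zero =>
    intro l fuel2 h1 _
    have : l = [] := by simpa using List.eq_nil_of_length_eq_zero (by omega)
    subst this
    rw [pvParts_nil sub hsub, pvParts_nil sub hsub]
  | succ k ih =>
    intro l fuel2 h1 h2
    by_cases hf : PySem.Chars.find l sub = -1
    · cases fuel2 with
      | zero =>
        have : l = [] := by simpa using List.eq_nil_of_length_eq_zero (by omega)
        subst this
        rw [pvParts_nil sub hsub]; rfl
      | succ k2 => rw [pvParts, if_pos hf, pvParts, if_pos hf]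
    · have hlne : l ≠ [] := by
        intro h; subst h; exact hf (pv_find_nil sub hsub)
      have hlen1 : 1 ≤ l.length := by
        cases l with | nil => exact absurd rfl hlne | cons a t => simp
    -- fuel2 ≥ 1
      cases fuel2 with
      | zero => omega
      | succ k2 =>
        have hm : 1 ≤ sub.length := by
          cases sub with | nil => exact absurd rfl hsub | cons a t => simp
        have hge : 0 ≤ PySem.Chars.find l sub := pv_find_nonneg _ _ hf
        have hdl : (l.drop ((PySem.Chars.find l sub).toNat + sub.length)).length ≤ l.length - 1 := by
          rw [List.length_drop]; omega
        rw [pvParts, if_neg hf, pvParts, if_neg hf,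
          ih (l.drop ((PySem.Chars.find l sub).toNat + sub.length)) k2 (by omega) (by omega)]

lemma pv_consHead_cons (sub : List Char) (_hsub : sub ≠ []) (c : Char) (rest : List Char)
    (hnp : ¬ sub <+: (c :: rest)) (k : Nat) (x : List Char) :
    pvConsHead x (pvParts sub (k+1) (c :: rest)) =
      pvConsHead (x ++ [c]) (pvParts sub (k+1) rest) := by
  have hstep := pv_find_cons c rest sub hnp
  by_cases hr : PySem.Chars.find rest sub = -1
  · have hcr : PySem.Chars.find (c :: rest) sub = -1 := by rw [hstep, if_pos hr]
    rw [pvParts, if_pos hcr, pvParts, if_pos hr]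
    simp [pvConsHead]
  · have hg : 0 ≤ PySem.Chars.find rest sub := pv_find_nonneg _ _ hr
    set g := PySem.Chars.find rest sub with hgdef
    have hcr : PySem.Chars.find (c :: rest) sub = g + 1 := by rw [hstep, if_neg hr]
    have hcrne : PySem.Chars.find (c :: rest) sub ≠ -1 := by rw [hcr]; omega
    rw [pvParts, if_neg hcrne, pvParts, if_neg hr, hcr]
    have ht : (g + 1).toNat = g.toNat + 1 := by omega
    rw [ht]
    have hdrop : (c :: rest).drop (g.toNat + 1 + sub.length) = rest.drop (g.toNat + sub.length) := by
      rw [show g.toNat + 1 + sub.length = (g.toNat + sub.length) + 1 by omega]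
      rfl
    rw [hdrop]
    simp [pvConsHead, List.take_succ_cons, ← hgdef]

lemma pv_go_parts (sub : List Char) (hsub : sub ≠ []) :
    ∀ (fuelG : Nat), ∀ (l cur : List Char) (acc : List (List Char)) (fuelP : Nat),
      l.length < fuelG → l.length ≤ fuelP →
      PySem.Chars.splitOn.go sub fuelG l cur acc =
        acc.reverse ++ pvConsHead cur.reverse (pvParts sub fuelP l) := by
  intro fuelG
  induction fuelG with
  | zero => intro l cur acc fuelP h1 _; omega
  | succ k ih =>
    intro l cur acc fuelP h1 h2
    cases l with
    | nil =>
      rw [pv_go_nil, pvParts_nil sub hsub]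
      simp [pvConsHead]
    | cons c rest =>
      rw [pv_go_cons]
      have hm : 1 ≤ sub.length := by
        cases sub with | nil => exact absurd rfl hsub | cons a t => simp
      by_cases hp : sub.isPrefixOf (c :: rest)
      · rw [if_pos hp]
        have hpre : sub <+: (c :: rest) := by
          rwa [← List.isPrefixOf_iff_prefix]
        have hf0 : PySem.Chars.find (c :: rest) sub = 0 := pv_find_prefix _ _ hpre
        have hlen : ((c :: rest).drop sub.length).length ≤ (c :: rest).length - 1 := by
          rw [List.length_drop]; simp; omega
        -- fuelP ≥ 1
        cases fuelP with
        | zero => simp at h2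
        | succ kp =>
          rw [ih ((c :: rest).drop sub.length) [] (cur.reverse :: acc) kp
            (by simp at h1 ⊢; omega) (by simp at h2 ⊢; omega)]
          rw [pvParts, if_neg (by rw [hf0]; norm_num), hf0]
          have : (0 : Int).toNat = 0 := rfl
          rw [this]
          simp only [List.take_zero, Nat.zero_add]
          cases hP : pvParts sub kp ((c :: rest).drop sub.length) with
          | nil => exact absurd hP (pvParts_ne_nil sub kp _)
          | cons h t => simp [pvConsHead]
      · rw [if_neg hp]
        have hnp : ¬ sub <+: (c :: rest) := by
          rwa [← List.isPrefixOf_iff_prefix]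
        cases fuelP with
        | zero => simp at h2
        | succ kp =>
          rw [ih rest (c :: cur) acc (kp + 1) (by simp at h1 ⊢; omega) (by simp at h2 ⊢; omega)]
          rw [pv_consHead_cons sub hsub c rest hnp kp]
          simp [pvConsHead]

lemma pv_splitOn_eq (sub l : List Char) (hsub : sub ≠ []) :
    PySem.Chars.splitOn l sub = pvParts sub l.length l := by
  rw [PySem.Chars.splitOn]
  rw [pv_go_parts sub hsub (l.length + 1) l [] [] l.length (by omega) (by omega)]
  cases hP : pvParts sub l.length l with
  | nil => exact absurd hP (pvParts_ne_nil sub _ _)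
  | cons h t => simp [pvConsHead]

lemma pv_fold_acc (m : Int) (ps : List (List Char)) :
    ∀ (i : Int) (s : List (Int × Int)),
      (ps.foldl (pvStepB m) (i, s)).2 = s ++ (ps.foldl (pvStepB m) (i, [])).2 := by
  induction ps with
  | nil => intro i s; simp
  | cons p t ih =>
    intro i s
    simp only [List.foldl_cons, pvStepB]
    rw [ih _ (s ++ _), ih _ ([] ++ _)]
    simp

-- B's spans satisfy the same first-match recurrence as A's loop
lemma pv_spans_spec (sub : List Char) (hsub : sub ≠ []) (l : List Char) (i : Int) :
    pvSpansOf sub l i =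
      if PySem.Chars.find l sub = -1 then []
      else (i + PySem.Chars.find l sub,
            i + PySem.Chars.find l sub + sub.length) ::
           pvSpansOf sub (l.drop ((PySem.Chars.find l sub).toNat + sub.length))
             (i + PySem.Chars.find l sub + sub.length) := by
  by_cases hf : PySem.Chars.find l sub = -1
  · rw [if_pos hf]
    have hP : pvParts sub l.length l = [l] := by
      cases hl : l with
      | nil => rw [← hl]; simp [hl, pvParts_nil sub hsub]
      | cons a t => rw [← hl]; rw [hl]; rw [show (a :: t).length = t.length + 1 from rfl, pvParts, if_pos (hl ▸ hf)]
    rw [pvSpansOf, hP]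
    rfl
  · rw [if_neg hf]
    have hlne : l ≠ [] := by
      intro h; subst h; exact hf (pv_find_nil sub hsub)
    have hm : 1 ≤ sub.length := by
      cases sub with | nil => exact absurd rfl hsub | cons a t => simp
    have hge : 0 ≤ PySem.Chars.find l sub := pv_find_nonneg _ _ hf
    set f := PySem.Chars.find l sub with hfdef
    have hfle : f ≤ (l.length : Int) := PySem.Chars.find_le_length l sub
    have hftn : f.toNat ≤ l.length := by omega
    obtain ⟨n, hn⟩ : ∃ n, l.length = n + 1 := by
      cases hl : l with
      | nil => exact absurd hl hlne
      | cons a t => exact ⟨t.length, rfl⟩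
    set l' := l.drop (f.toNat + sub.length) with hl'def
    have hP : pvParts sub l.length l = l.take f.toNat :: pvParts sub n l' := by
      rw [hn, pvParts, if_neg hf]
    have hl'len : l'.length ≤ n := by
      rw [hl'def, List.length_drop]; omega
    have hPf : pvParts sub n l' = pvParts sub l'.length l' :=
      pvParts_fuel sub hsub n l' l'.length hl'len (le_refl _)
    rw [pvSpansOf, hP, hPf]
    have hdl : (l.take f.toNat :: pvParts sub l'.length l').dropLast
        = l.take f.toNat :: (pvParts sub l'.length l').dropLast := by
      rw [List.dropLast_cons_of_ne_nil (pvParts_ne_nil sub _ _)]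
    rw [hdl, List.foldl_cons]
    have htake : ((l.take f.toNat).length : Int) = f := by
      rw [List.length_take]; push_cast; omega
    have hstep : pvStepB (sub.length : Int) (i, []) (l.take f.toNat)
        = (i + f + sub.length, [(i + f, i + f + sub.length)]) := by
      simp only [pvStepB, htake, List.nil_append]
    rw [hstep, pv_fold_acc]
    rfl

lemma pv_main (text substring : String) (hsub : substring.toList ≠ []) :
    ∀ (fuel : Nat) (k : Nat) (spans : List (Int × Int)),
      k ≤ text.toList.length → text.toList.length - k < fuel →
      pvFindLoopA text substring (k : Int) spans fuel =
        spans ++ pvSpansOf substring.toList (text.toList.drop k) (k : Int) := by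
  intro fuel
  induction fuel with
  | zero => intro k spans hk hf; omega
  | succ fuel ih =>
    intro k spans hk hf
    have hff : PySem.Str.findFrom text substring (k : Int) =
        PySem.Chars.findFrom text.toList substring.toList (k : Int) none :=
      PySem.Str.findFrom_eq _ _ _ _
    have hnat := PySem.Chars.findFrom_natCast text.toList substring.toList k hk
    by_cases hfind : PySem.Chars.find (text.toList.drop k) substring.toList = -1
    · have hmi : PySem.Str.findFrom text substring (k : Int) = -1 := by
        rw [hff, hnat, if_pos hfind]
      rw [pvFindLoopA]
      simp only [hmi]
      rw [if_pos (by norm_num)]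
      rw [pv_spans_spec substring.toList hsub, if_pos hfind, List.append_nil]
    · set f := PySem.Chars.find (text.toList.drop k) substring.toList with hf0
      have hgef : 0 ≤ f := pv_find_nonneg _ _ hfind
      have hmi : PySem.Str.findFrom text substring (k : Int) = (k : Int) + f := by
        rw [hff, hnat, if_neg hfind]
      have hne : PySem.Chars.findFrom text.toList substring.toList (k : Int) ≠ -1 := by
        rw [hnat, if_neg hfind]; omega
      have hspec := PySem.Chars.findFrom_natCast_spec text.toList substring.toList k hk hne
      have hpre : substring.toList <+:
          text.toList.drop ((PySem.Chars.findFrom text.toList substring.toList (k : Int)).toNat) :=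
        hspec.2.1
      have htoNat : (PySem.Chars.findFrom text.toList substring.toList (k : Int)).toNat
          = k + f.toNat := by rw [hnat, if_neg hfind]; omega
      have hlen := hpre.length_le
      rw [htoNat] at hlen
      rw [List.length_drop] at hlen
      have hmpos : 1 ≤ substring.toList.length := by
        cases hs : substring.toList with
        | nil => exact absurd hs hsub
        | cons a s => simp
      have hbound : k + f.toNat + substring.toList.length ≤ text.toList.length := by omega
      rw [pvFindLoopA]
      simp only [hmi]
      rw [if_neg (by omega)]
      have hlenstr : PySem.Str.len substring = (substring.toList.length : Int) :=
        PySem.Str.len_eq substring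
      have hcast : (k : Int) + f + PySem.Str.len substring
          = ((k + f.toNat + substring.toList.length : Nat) : Int) := by
        rw [hlenstr]; push_cast; omega
      have hfuel' : text.toList.length - (k + f.toNat + substring.toList.length) < fuel := by
        omega
      rw [hcast, ih (k + f.toNat + substring.toList.length) _ hbound hfuel']
      rw [pv_spans_spec substring.toList hsub (text.toList.drop k), if_neg hfind, ← hf0]
      rw [List.drop_drop]
      have hd : k + (f.toNat + substring.toList.length) = k + f.toNat + substring.toList.length := by
        omega
      rw [hd]
      have hc2 : ((k + f.toNat + substring.toList.length : Nat) : Int)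
          = (k : Int) + f + substring.toList.length := by push_cast; omega
      rw [hc2, List.append_assoc]
      rfl

-- ===== VERDICT (by name: the statement is the Claim_ definition above) =====
theorem find_all_substring_spans_py_spec : Claim_equal_find_all_substring_spans_py := by
  intro text substring _
  unfold Spec_find_all_substring_spans_py
  unfold find_all_substring_spans_py find_all_substring_spans_py_alt
  by_cases hg : (text.toList.isEmpty || substring.toList.isEmpty) = true
  · rw [if_pos hg, if_pos hg]
  · rw [if_neg hg, if_neg hg]
    have hsub : substring.toList ≠ [] := by
      simp only [Bool.or_eq_true, List.isEmpty_iff] at hg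
      exact fun h => hg (Or.inr h)
    have := pv_main text substring hsub (text.toList.length + 1) 0 [] (Nat.zero_le _) (by omega)
    rw [pv_splitOn_eq substring.toList text.toList hsub]
    have hlenstr : PySem.Str.len substring = (substring.toList.length : Int) :=
      PySem.Str.len_eq substring
    rw [hlenstr]
    simpa [pvSpansOf] using this
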